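-- pv_equiv track=rewrite | github.com/MuhammadAmmarSaleem/SHA-512 | sha.py | appendBits
-- ===== SOURCE A (Python) =====
-- def appendBits(binary):
--     bin=binary
--     numBits=len(bin)*8
--     length=numBits
--     count=1
--     while length%1024 != 896%1024:
--         if count==1:
--              bin.append('10000000')
--         else:
--             bin.append('00000000')
--         count=count+1
--         length=len(bin)*8
--
--     endBits = '{0:0128b}'.format(numBits)
--     count1 = 1
--     for x in range(len(endBits)):
--         if count1 % 8 == 0:
--             bin.append(endBits[count1 - 8:count1])
--         count1 = count1 + 1
--
--     return bin
-- ===== SOURCE B (Python) =====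
-- def appendBits(binary):
--     numBits = len(binary) * 8
--     k = ((896 - numBits) % 1024) // 8
--     if k > 0:
--         binary.append('10000000')
--         binary.extend(['00000000'] * (k - 1))
--     bits = '{0:0128b}'.format(numBits)
--     binary.extend(bits[i:i + 8] for i in range(0, len(bits) - 7, 8))
--     return binary
-- ===== Notes on version B (the rewrite author's own statement) =====
-- stated objective: simpler
-- what changed: B replaces A's byte-at-a-time while loop (recomputing len*8 % 1024 each iteration) with a closed-form padding count k = ((896 - numBits) % 1024) // 8 appended in one shot, and replaces A's 128-step counter loop over the length string with a direct stride-8 slice comprehension.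
import Mathlib
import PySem

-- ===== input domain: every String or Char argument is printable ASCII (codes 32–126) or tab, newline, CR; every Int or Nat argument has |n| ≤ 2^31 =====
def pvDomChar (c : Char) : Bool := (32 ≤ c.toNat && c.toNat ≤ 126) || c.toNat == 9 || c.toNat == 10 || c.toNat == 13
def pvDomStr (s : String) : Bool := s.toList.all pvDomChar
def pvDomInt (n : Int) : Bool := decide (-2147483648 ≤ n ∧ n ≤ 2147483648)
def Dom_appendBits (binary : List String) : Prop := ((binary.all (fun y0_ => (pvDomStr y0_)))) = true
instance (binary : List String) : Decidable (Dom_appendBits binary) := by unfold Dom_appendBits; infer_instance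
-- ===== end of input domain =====

-- B simplifies A: the padding byte count is computed in closed form instead of A's
-- byte-at-a-time while loop, and the 16 length bytes are taken by direct stride-8 slices
-- instead of A's 128-step counter loop. Both Pythons mutate and return the argument list;
-- the equivalence proved here is about the return value (B performs the same mutation).

-- ===== PORT A =====
-- shared helper: port of '{0:0128b}'.format(n) — exact for 0 ≤ n (both programs only format len(binary)*8 ≥ 0)
def pyBin128 (n : Int) : List Char :=
  let d := PySem.Int.toBinChars n
  List.replicate (128 - d.length) '0' ++ d

-- A's while loop; the fuel 128 is only a totality guard: the loop runs at most 127 times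
-- (it stops as soon as len*8 % 1024 == 896, which happens within 127 appended bytes).
def appendBitsLoop : Nat → List String → Int → List String
  | 0, bin, _ => bin
  | fuel + 1, bin, count =>
    if PySem.Int.mod ((bin.length : Int) * 8) 1024 ≠ PySem.Int.mod 896 1024 then
      appendBitsLoop fuel (bin ++ [if count = 1 then "10000000" else "00000000"]) (count + 1)
    else bin

-- one iteration of A's second loop body (counter count1; appends a slice when count1 % 8 == 0)
def stepA (endBits : List Char) (st : List String × Int) : List String × Int :=
  if PySem.Int.mod st.2 8 = 0 then
    (st.1 ++ [String.ofList (PySem.List.slice endBits (some (st.2 - 8)) (some st.2))], st.2 + 1)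
  else (st.1, st.2 + 1)

def appendBits (binary : List String) : List String :=
  let numBits : Int := (binary.length : Int) * 8
  let bin := appendBitsLoop 128 binary 1
  let endBits := pyBin128 numBits
  ((PySem.List.pyRange 0 (PySem.List.len endBits) 1).foldl
      (fun st _ => stepA endBits st) (bin, 1)).1

-- ===== PORT B =====
def appendBits_alt (binary : List String) : List String :=
  let numBits : Int := (binary.length : Int) * 8
  let k := PySem.Int.floordiv (PySem.Int.mod (896 - numBits) 1024) 8
  let bin :=
    if 0 < k then binary ++ ["10000000"] ++ List.replicate (k - 1).toNat "00000000"
    else binary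
  let bits := pyBin128 numBits
  bin ++ (PySem.List.pyRange 0 (PySem.List.len bits - 7) 8).map
      (fun i => String.ofList (PySem.List.slice bits (some i) (some (i + 8))))

-- ===== PRECONDITION & SPEC =====
def Spec_appendBits (binary : List String) (out : List String) : Prop := out = appendBits_alt binary
instance (binary : List String) (out : List String) : Decidable (Spec_appendBits binary out) := by unfold Spec_appendBits; infer_instance

-- ===== CLAIM (what is proved, stated in full; the proofs are below) =====
def Claim_equal_appendBits : Prop := ∀ (binary : List String), Dom_appendBits binary → Spec_appendBits binary (appendBits binary)

-- ===== LEMMAS AND PROOFS =====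

-- what A's while loop appends: one byte per step, '10000000' exactly when count == 1
def padSeq : Int → Nat → List String
  | _, 0 => []
  | c, k + 1 => (if c = 1 then "10000000" else "00000000") :: padSeq (c + 1) k

lemma mod1024_eq (c : Int) : PySem.Int.mod c 1024 = c % 1024 :=
  PySem.Int.mod_eq_emod_of_pos (by norm_num)

lemma appendBitsLoop_eq (k : Nat) : ∀ (fuel : Nat) (bin : List String) (c : Int),
    k = (112 + 128 - bin.length % 128) % 128 → k ≤ fuel →
    appendBitsLoop fuel bin c = bin ++ padSeq c k := by
  induction k with
  | zero =>
    intro fuel bin c hk _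
    have hmod : bin.length % 128 = 112 := by omega
    cases fuel with
    | zero => simp [appendBitsLoop, padSeq]
    | succ f =>
      simp only [appendBitsLoop, padSeq, List.append_nil]
      rw [if_neg (by rw [mod1024_eq, mod1024_eq]; omega)]
  | succ k ih =>
    intro fuel bin c hk hfuel
    cases fuel with
    | zero => omega
    | succ f =>
      have hcond : PySem.Int.mod ((bin.length : Int) * 8) 1024 ≠ PySem.Int.mod 896 1024 := by
        rw [mod1024_eq, mod1024_eq]; omega
      have hlen : (bin ++ [if c = 1 then "10000000" else "00000000"]).length = bin.length + 1 := by
        simp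
      have := ih f (bin ++ [if c = 1 then "10000000" else "00000000"]) (c + 1)
        (by rw [hlen]; omega) (by omega)
      simp only [appendBitsLoop, if_pos hcond, this, padSeq, List.append_assoc,
        List.singleton_append]

lemma padSeq_const (k : Nat) : ∀ (c : Int), 2 ≤ c → padSeq c k = List.replicate k "00000000" := by
  induction k with
  | zero => intro c _; rfl
  | succ k ih =>
    intro c hc
    have : ¬ (c = 1) := by omega
    simp [padSeq, this, ih (c + 1) (by omega), List.replicate_succ]

lemma padSeq_one : ∀ (k : Nat),
    padSeq 1 k = if 0 < k then "10000000" :: List.replicate (k - 1) "00000000" else [] := by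
  intro k
  cases k with
  | zero => rfl
  | succ k => simp [padSeq, padSeq_const k 2 (by norm_num)]

-- A's second loop ignores the range element: it is iteration of stepA
lemma foldl_stepA (e : List Char) (l : List Int) (st : List String × Int) :
    l.foldl (fun s _ => stepA e s) st = (stepA e)^[l.length] st := by
  induction l generalizing st with
  | nil => rfl
  | cons x xs ih => simp [List.foldl_cons, ih, Function.iterate_succ_apply]

lemma stepA_ne (e : List Char) (b : List String) (c : Int) (h : c % 8 ≠ 0) :
    stepA e (b, c) = (b, c + 1) := by
  simp [stepA, h]

lemma stepA_eq (e : List Char) (b : List String) (c : Int) (h : c % 8 = 0) :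
    stepA e (b, c) = (b ++ [String.ofList (PySem.List.slice e (some (c - 8)) (some c))], c + 1) := by
  simp [stepA, h]

def chunk (e : List Char) (j : Nat) : String :=
  String.ofList (PySem.List.slice e (some (8 * (j : Int))) (some (8 * (j : Int) + 8)))

lemma stepA_block (e : List Char) (j : Nat) (b : List String) :
    (stepA e)^[8] (b, 8 * (j : Int) + 1) = (b ++ [chunk e j], 8 * (j : Int) + 9) := by
  rw [show ((stepA e)^[8] (b, 8 * (j : Int) + 1)) =
      (stepA e)^[7] (stepA e (b, 8 * (j : Int) + 1)) from Function.iterate_succ_apply _ _ _]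
  rw [stepA_ne e _ _ (by omega)]
  rw [show ((stepA e)^[7] (b, 8 * (j : Int) + 1 + 1)) =
      (stepA e)^[6] (stepA e (b, 8 * (j : Int) + 1 + 1)) from Function.iterate_succ_apply _ _ _]
  rw [stepA_ne e _ _ (by omega)]
  rw [show ((stepA e)^[6] (b, 8 * (j : Int) + 1 + 1 + 1)) =
      (stepA e)^[5] (stepA e (b, 8 * (j : Int) + 1 + 1 + 1)) from Function.iterate_succ_apply _ _ _]
  rw [stepA_ne e _ _ (by omega)]
  rw [show ((stepA e)^[5] (b, 8 * (j : Int) + 1 + 1 + 1 + 1)) =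
      (stepA e)^[4] (stepA e (b, 8 * (j : Int) + 1 + 1 + 1 + 1)) from Function.iterate_succ_apply _ _ _]
  rw [stepA_ne e _ _ (by omega)]
  rw [show ((stepA e)^[4] (b, 8 * (j : Int) + 1 + 1 + 1 + 1 + 1)) =
      (stepA e)^[3] (stepA e (b, 8 * (j : Int) + 1 + 1 + 1 + 1 + 1)) from Function.iterate_succ_apply _ _ _]
  rw [stepA_ne e _ _ (by omega)]
  rw [show ((stepA e)^[3] (b, 8 * (j : Int) + 1 + 1 + 1 + 1 + 1 + 1)) =
      (stepA e)^[2] (stepA e (b, 8 * (j : Int) + 1 + 1 + 1 + 1 + 1 + 1)) from Function.iterate_succ_apply _ _ _]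
  rw [stepA_ne e _ _ (by omega)]
  rw [show ((stepA e)^[2] (b, 8 * (j : Int) + 1 + 1 + 1 + 1 + 1 + 1 + 1)) =
      (stepA e)^[1] (stepA e (b, 8 * (j : Int) + 1 + 1 + 1 + 1 + 1 + 1 + 1)) from Function.iterate_succ_apply _ _ _]
  rw [stepA_ne e _ _ (by omega)]
  rw [show ((stepA e)^[1] (b, 8 * (j : Int) + 1 + 1 + 1 + 1 + 1 + 1 + 1 + 1)) =
      stepA e (b, 8 * (j : Int) + 1 + 1 + 1 + 1 + 1 + 1 + 1 + 1) from
      congrFun (Function.iterate_one (stepA e)) _]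
  rw [stepA_eq e _ _ (by omega)]
  refine Prod.ext ?_ (by omega)
  have hY : (8 * (j : Int) + 1 + 1 + 1 + 1 + 1 + 1 + 1 + 1) = 8 * (j : Int) + 8 := by ring
  have hZ : (8 * (j : Int) + 8 - 8) = 8 * (j : Int) := by ring
  simp only [chunk, hY, hZ]

lemma stepA_blocks (e : List Char) (q : Nat) : ∀ (j : Nat) (b : List String),
    (stepA e)^[8 * q] (b, 8 * (j : Int) + 1) =
      (b ++ (List.range q).map (fun t => chunk e (j + t)), 8 * ((j + q : Nat) : Int) + 1) := by
  induction q with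
  | zero => intro j b; simp
  | succ q ih =>
    intro j b
    have hsplit : 8 * (q + 1) = 8 * q + 8 := by omega
    rw [hsplit, Function.iterate_add_apply, stepA_block e j b]
    have h9 : (8 * (j : Int) + 9) = 8 * ((j + 1 : Nat) : Int) + 1 := by push_cast; ring
    rw [h9, ih (j + 1) (b ++ [chunk e j])]
    refine Prod.ext ?_ (by push_cast; ring)
    have hmap : (List.range (q + 1)).map (fun t => chunk e (j + t)) =
        chunk e j :: (List.range q).map (fun t => chunk e (j + 1 + t)) := by
      rw [List.range_succ_eq_map, List.map_cons, List.map_map]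
      refine congrArg₂ List.cons (by norm_num) ?_
      apply List.map_congr_left
      intro t _
      simp only [Function.comp]
      congr 1
      omega
    simp only [hmap, List.append_assoc, List.singleton_append]

lemma stepA_rem (e : List Char) (r : Nat) : ∀ (j i : Nat) (b : List String), 1 ≤ i → i + r ≤ 8 →
    (stepA e)^[r] (b, 8 * (j : Int) + (i : Int)) = (b, 8 * (j : Int) + (i : Int) + (r : Int)) := by
  induction r with
  | zero => intro j i b _ _; simp
  | succ r ih =>
    intro j i b hi hir
    rw [Function.iterate_succ_apply, stepA_ne e _ _ (by omega)]
    have : 8 * (j : Int) + (i : Int) + 1 = 8 * (j : Int) + ((i + 1 : Nat) : Int) := by push_cast; ring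
    rw [this, ih j (i + 1) b (by omega) (by omega)]
    refine Prod.ext rfl ?_
    push_cast; ring

lemma tailA_eq (e : List Char) (bin : List String) :
    ((stepA e)^[e.length] (bin, 1)).1 = bin ++ (List.range (e.length / 8)).map (chunk e) := by
  rw [show (stepA e)^[e.length] = (stepA e)^[e.length % 8 + 8 * (e.length / 8)] from by
    congr 1; omega]
  rw [Function.iterate_add_apply]
  have h1 : (1 : Int) = 8 * ((0 : Nat) : Int) + 1 := by norm_num
  rw [h1, stepA_blocks e (e.length / 8) 0 bin]
  have hr := stepA_rem e (e.length % 8) (0 + e.length / 8)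
      1 (bin ++ (List.range (e.length / 8)).map (fun t => chunk e (0 + t))) (by omega) (by omega)
  simp only [Nat.cast_one] at hr
  rw [hr]
  simp

-- B's stride-8 range produces exactly the chunks
lemma tailB_eq (e : List Char) :
    (PySem.List.pyRange 0 ((PySem.List.len e) - 7) 8).map
        (fun i => String.ofList (PySem.List.slice e (some i) (some (i + 8)))) =
      (List.range (e.length / 8)).map (chunk e) := by
  rw [PySem.List.pyRange_of_pos 0 ((PySem.List.len e) - 7) (by norm_num)]
  rw [List.map_map]
  have hlen : PySem.List.len e = (e.length : Int) := PySem.List.len_eq e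
  have hN : (if (0 : Int) < PySem.List.len e - 7 then (((PySem.List.len e) - 7 - 0 + 8 - 1) / 8).toNat else 0)
      = e.length / 8 := by
    rw [hlen]
    split_ifs with h
    · omega
    · omega
  rw [hN]
  apply List.map_congr_left
  intro k _
  simp only [Function.comp, chunk]
  norm_num

-- ===== VERDICT (by name: the statement is the Claim_ definition above) =====
theorem appendBits_spec : Claim_equal_appendBits := by
  unfold Claim_equal_appendBits
  intro binary _
  unfold Spec_appendBits appendBits appendBits_alt
  simp only []
  set n := binary.length with hn
  set kN : Nat := (112 + 128 - n % 128) % 128 with hkN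
  -- A's while loop = B's closed-form pad
  have hpadA : appendBitsLoop 128 binary 1 = binary ++ padSeq 1 kN :=
    appendBitsLoop_eq kN 128 binary 1 (by rw [hkN, hn]) (by omega)
  have hkB : PySem.Int.floordiv (PySem.Int.mod (896 - (n : Int) * 8) 1024) 8 = (kN : Int) := by
    rw [PySem.Int.floordiv_eq_ediv_of_pos (by norm_num), mod1024_eq]
    omega
  have hpadB :
      (if (0 : Int) < PySem.Int.floordiv (PySem.Int.mod (896 - (n : Int) * 8) 1024) 8 then
          binary ++ ["10000000"] ++ List.replicate
            ((PySem.Int.floordiv (PySem.Int.mod (896 - (n : Int) * 8) 1024) 8 - 1)).toNat "00000000"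
        else binary) = binary ++ padSeq 1 kN := by
    rw [hkB, padSeq_one kN]
    by_cases h : 0 < kN
    · rw [if_pos (by exact_mod_cast h), if_pos h]
      have : ((kN : Int) - 1).toNat = kN - 1 := by omega
      rw [this]
      simp
    · rw [if_neg (by exact_mod_cast h), if_neg h]
      simp
  -- the tails agree
  set e := pyBin128 ((n : Int) * 8) with he
  have hlenr : (PySem.List.pyRange 0 (PySem.List.len e) 1).length = e.length := by
    rw [PySem.List.length_pyRange_one, PySem.List.len_eq]
    omega
  rw [hpadA, foldl_stepA, hlenr, tailA_eq e (binary ++ padSeq 1 kN), hpadB, tailB_eq e]
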